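-- pv_equiv track=rewrite | github.com/simak-p/week_weather_10 | weather_app/wc_data.py | y_axis_range
-- ===== SOURCE A (Python) =====
-- def y_axis_range(y_axes: list):
--     """
--
--     :param y_axes:
--     :return:
--     """
--     n = int
--     full_axes = sum(y_axes, [])
--     for n in range(1, 5):
--         if ((int(max(set(full_axes))) + 2) - (int(min(set(full_axes))) - n)) % 2 == 0:
--             break
--         else:
--             n += 1
--     return [int(min(set(full_axes))) - n, int(max(set(full_axes))) + 2]
-- ===== SOURCE B (Python) =====
-- def y_axis_range(y_axes: list):
--     full = [v for row in y_axes for v in row]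
--     mn = int(min(full))
--     mx = int(max(full))
--     n = 1 if (mx - mn) % 2 == 1 else 2
--     return [mn - n, mx + 2]
-- ===== Notes on version B (the rewrite author's own statement) =====
-- stated objective: simpler
-- what changed: B flattens once with a comprehension, computes min/max of the list directly (no repeated set() rebuilds), and replaces A's 4-iteration search loop by the closed-form parity choice n = 1 if (mx-mn) is odd else 2.
import Mathlib
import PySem

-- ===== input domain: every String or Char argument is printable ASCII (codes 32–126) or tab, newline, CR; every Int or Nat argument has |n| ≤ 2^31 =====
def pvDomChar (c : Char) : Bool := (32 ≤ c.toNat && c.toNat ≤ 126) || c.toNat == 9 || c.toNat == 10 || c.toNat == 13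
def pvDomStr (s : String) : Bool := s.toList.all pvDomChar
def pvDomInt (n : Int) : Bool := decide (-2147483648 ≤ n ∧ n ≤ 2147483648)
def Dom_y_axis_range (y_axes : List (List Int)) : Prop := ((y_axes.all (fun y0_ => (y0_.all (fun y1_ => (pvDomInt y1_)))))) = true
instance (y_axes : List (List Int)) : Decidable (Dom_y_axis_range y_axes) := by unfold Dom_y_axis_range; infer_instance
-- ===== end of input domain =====

-- B replaces A's 4-iteration search loop (recomputing min/max of the flattened set each time)
-- by the closed-form parity choice n = 1 or 2; objective: simpler.

-- ===== PORT A =====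
-- the for-loop 'for n in range(1,5): if cond: break else: n += 1' (break value = k, fall-through value = 5)
def yarLoopA (mx mn : Int) : List Int → Int → Int
  | [], n => n
  | k :: ks, _ => if ((mx + 2) - (mn - k)) % 2 == 0 then k else yarLoopA mx mn ks (k + 1)

def y_axis_range (y_axes : List (List Int)) : List Int :=
  let full_axes := y_axes.foldl (· ++ ·) []        -- sum(y_axes, [])
  -- min(set(full_axes)) / max(set(full_axes)); none (= ValueError on empty) is excluded by Pre_
  let mx := (PySem.List.max? (PySem.Set.ofList full_axes) (fun x => x)).getD 0
  let mn := (PySem.List.min? (PySem.Set.ofList full_axes) (fun x => x)).getD 0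
  let n := yarLoopA mx mn (PySem.List.pyRange 1 5 1) 0
  [mn - n, mx + 2]

-- ===== PORT B =====
def y_axis_range_alt (y_axes : List (List Int)) : List Int :=
  let full := y_axes.flatten
  let mn := (PySem.List.min? full (fun x => x)).getD 0
  let mx := (PySem.List.max? full (fun x => x)).getD 0
  let n : Int := if (mx - mn) % 2 == 1 then 1 else 2
  [mn - n, mx + 2]

-- ===== PRECONDITION & SPEC =====
-- Python A raises ValueError (min/max of an empty sequence) when the flattened input is empty.
def Pre_y_axis_range (y_axes : List (List Int)) : Prop := y_axes.flatten ≠ []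
instance (y_axes : List (List Int)) : Decidable (Pre_y_axis_range y_axes) := by unfold Pre_y_axis_range; infer_instance
def pvWitness_y_axis_range : List (List Int) := [[3, -1], [4]]

def Spec_y_axis_range (y_axes : List (List Int)) (out : List Int) : Prop := out = y_axis_range_alt y_axes
instance (y_axes : List (List Int)) (out : List Int) : Decidable (Spec_y_axis_range y_axes out) := by unfold Spec_y_axis_range; infer_instance

-- ===== CLAIM (what is proved, stated in full; the proofs are below) =====
def Claim_equal_y_axis_range : Prop := ∀ (y_axes : List (List Int)), Dom_y_axis_range y_axes → Pre_y_axis_range y_axes → Spec_y_axis_range y_axes (y_axis_range y_axes)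

-- ===== LEMMAS AND PROOFS =====

theorem yar_foldl_append (l : List (List Int)) :
    l.foldl (· ++ ·) [] = l.flatten := by
  suffices h : ∀ acc : List Int, l.foldl (· ++ ·) acc = acc ++ l.flatten by
    simpa using h []
  induction l with
  | nil => intro acc; simp
  | cons x xs ih => intro acc; simp [List.foldl, ih, List.append_assoc]

-- min over the deduplicated set equals min over the list (same membership, antisymmetry)
theorem yar_min_ofList (l : List Int) (h : l ≠ []) :
    PySem.List.min? (PySem.Set.ofList l) (fun x => x) = PySem.List.min? l (fun x => x) := by
  obtain ⟨m1, hm1⟩ := Option.ne_none_iff_exists'.mp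
    (fun hn => h ((PySem.List.min?_eq_none_iff _ (fun x : Int => x)).mp hn))
  have hset : PySem.Set.ofList l ≠ [] := by
    intro hn
    have := (PySem.Set.mem_ofList l (l.head h)).mpr (List.head_mem h)
    simp [hn] at this
  obtain ⟨m2, hm2⟩ := Option.ne_none_iff_exists'.mp
    (fun hn => hset ((PySem.List.min?_eq_none_iff _ (fun x : Int => x)).mp hn))
  have h1m : m1 ∈ l := PySem.List.min?_mem hm1
  have h2m : m2 ∈ l := (PySem.Set.mem_ofList _ _).mp (PySem.List.min?_mem hm2)
  have h12 : m1 ≤ m2 := PySem.List.min?_isMin hm1 m2 h2m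
  have h21 : m2 ≤ m1 := PySem.List.min?_isMin hm2 m1 ((PySem.Set.mem_ofList _ _).mpr h1m)
  rw [hm1, hm2, le_antisymm h21 h12]

theorem yar_max_ofList (l : List Int) (h : l ≠ []) :
    PySem.List.max? (PySem.Set.ofList l) (fun x => x) = PySem.List.max? l (fun x => x) := by
  obtain ⟨m1, hm1⟩ := Option.ne_none_iff_exists'.mp
    (fun hn => h ((PySem.List.max?_eq_none_iff _ (fun x : Int => x)).mp hn))
  have hset : PySem.Set.ofList l ≠ [] := by
    intro hn
    have := (PySem.Set.mem_ofList l (l.head h)).mpr (List.head_mem h)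
    simp [hn] at this
  obtain ⟨m2, hm2⟩ := Option.ne_none_iff_exists'.mp
    (fun hn => hset ((PySem.List.max?_eq_none_iff _ (fun x : Int => x)).mp hn))
  have h1m : m1 ∈ l := PySem.List.max?_mem hm1
  have h2m : m2 ∈ l := (PySem.Set.mem_ofList _ _).mp (PySem.List.max?_mem hm2)
  have h12 : m2 ≤ m1 := PySem.List.max?_isMax hm1 m2 h2m
  have h21 : m1 ≤ m2 := PySem.List.max?_isMax hm2 m1 ((PySem.Set.mem_ofList _ _).mpr h1m)
  rw [hm1, hm2, le_antisymm h12 h21]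

theorem yar_loop_closed (mx mn : Int) :
    yarLoopA mx mn (PySem.List.pyRange 1 5 1) 0
      = if (mx - mn) % 2 == 1 then 1 else 2 := by
  have hr : PySem.List.pyRange 1 5 1 = [1, 2, 3, 4] := by decide
  rw [hr]
  simp only [yarLoopA]
  by_cases hp : (mx - mn) % 2 = 1
  · have : ((mx + 2) - (mn - 1)) % 2 = 0 := by omega
    simp [this, hp]
  · have h1 : ¬ (((mx + 2) - (mn - 1)) % 2 = 0) := by omega
    have h2 : ((mx + 2) - (mn - 2)) % 2 = 0 := by omega
    simp [h1, h2, hp]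

-- ===== VERDICT (by name: the statement is the Claim_ definition above) =====
theorem y_axis_range_spec : Claim_equal_y_axis_range := by
  intro y_axes _ hpre
  unfold Spec_y_axis_range y_axis_range y_axis_range_alt
  simp only [yar_foldl_append, yar_min_ofList _ hpre, yar_max_ofList _ hpre, yar_loop_closed]
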